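-- pv_equiv track=rewrite | github.com/kewingchang/CryptoMamba | scripts/extract_mase_qlow.py | extract_additional_features
-- ===== SOURCE A (Python) =====
-- def extract_additional_features(lines):
--     pattern = r'<<<<<<<<<<<<>>>>>>>>>>>>'
--     features = None
--     found_first = False
--     for line in lines:
--         if pattern in line:
--             if found_first:
--                 # Second occurrence, features is the previous line
--                 break
--             found_first = True
--         elif found_first:
--             features = line.strip()
--     return features
-- ===== SOURCE B (Python) =====
-- def extract_additional_features(lines):
--     pattern = r'<<<<<<<<<<<<>>>>>>>>>>>>'
--     lines = list(lines)
--     first = next((i for i, l in enumerate(lines) if pattern in l), None)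
--     if first is None:
--         return None
--     rest = lines[first + 1:]
--     second = next((j for j, l in enumerate(rest) if pattern in l), len(rest))
--     seg = rest[:second]
--     return seg[-1].strip() if seg else None
-- ===== Notes on version B (the rewrite author's own statement) =====
-- stated objective: alternative
-- what changed: Replaced A's single stateful pass (found_first flag, running 'features' variable, break) by a find-positions-then-slice decomposition: locate the first marker line, locate the next marker after it (or end of list), take the slice strictly between them and return its last element stripped.
import Mathlib
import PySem

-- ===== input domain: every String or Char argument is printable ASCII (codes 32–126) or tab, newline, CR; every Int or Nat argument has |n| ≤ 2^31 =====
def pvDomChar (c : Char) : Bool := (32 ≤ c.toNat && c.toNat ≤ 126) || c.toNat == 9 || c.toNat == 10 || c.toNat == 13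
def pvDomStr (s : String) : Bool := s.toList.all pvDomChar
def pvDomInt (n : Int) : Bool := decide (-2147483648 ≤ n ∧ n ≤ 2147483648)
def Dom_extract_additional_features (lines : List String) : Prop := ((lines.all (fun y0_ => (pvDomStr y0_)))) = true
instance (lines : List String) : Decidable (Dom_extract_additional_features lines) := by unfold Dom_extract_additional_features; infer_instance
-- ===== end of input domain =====

-- B replaces A's single stateful pass (flag + running variable + break) by a
-- find-marker-positions-then-slice decomposition; alternative, same cost.

-- ===== PORT A =====
def pvPat : String := "<<<<<<<<<<<<>>>>>>>>>>>>"

-- A's for-loop with state (features, found_first) and the break on the second marker.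
def pvLoopA : List String → Option String → Bool → Option String
  | [], features, _ => features
  | l :: ls, features, found_first =>
    if PySem.Str.isIn pvPat l then
      (if found_first then features else pvLoopA ls features true)
    else if found_first then pvLoopA ls (some (PySem.Str.strip l)) true
    else pvLoopA ls features false

def extract_additional_features (lines : List String) : Option String :=
  pvLoopA lines none false

-- ===== PORT B =====
def extract_additional_features_alt (lines : List String) : Option String :=
  match lines.findIdx? (fun l => PySem.Str.isIn pvPat l) with
  | none => none
  | some first =>
    let rest := lines.drop (first + 1)
    let second := (rest.findIdx? (fun l => PySem.Str.isIn pvPat l)).getD rest.length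
    let seg := rest.take second
    seg.getLast?.map PySem.Str.strip

-- ===== PRECONDITION & SPEC =====
def Spec_extract_additional_features (lines : List String) (out : Option String) : Prop := out = extract_additional_features_alt lines
instance (lines : List String) (out : Option String) : Decidable (Spec_extract_additional_features lines out) := by unfold Spec_extract_additional_features; infer_instance

-- ===== CLAIM (what is proved, stated in full; the proofs are below) =====
def Claim_equal_extract_additional_features : Prop := ∀ (lines : List String), Dom_extract_additional_features lines → Spec_extract_additional_features lines (extract_additional_features lines)

-- ===== LEMMAS AND PROOFS =====

theorem pv_getLast?_cons_none {α : Type} (a : α) (l : List α) (h : l.getLast? = none) :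
    (a :: l).getLast? = some a := by
  cases l with
  | nil => rfl
  | cons b bs => simp at h

theorem pv_getLast?_cons_some {α : Type} (a x : α) (l : List α) (h : l.getLast? = some x) :
    (a :: l).getLast? = some x := by
  cases l with
  | nil => simp at h
  | cons b bs => rw [List.getLast?_cons_cons, h]

-- take up to the first index satisfying p (or the whole list) = takeWhile (!p)
theorem pv_take_findIdx {α : Type} (p : α → Bool) (ls : List α) :
    ls.take (((ls.findIdx? p).getD ls.length)) = ls.takeWhile (fun l => !p l) := by
  induction ls with
  | nil => rfl
  | cons l ls ih =>
    by_cases h : p l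
    · simp [List.findIdx?_cons, h]
    · simp only [List.findIdx?_cons, h, ite_false, List.takeWhile_cons, Bool.not_eq_eq_eq_not,
        Bool.not_true, if_neg, Bool.false_eq_true, Bool.not_false, if_pos]
      cases hf : ls.findIdx? p with
      | none =>
        rw [hf] at ih
        simp only [Option.map_none, Option.getD_none, List.length_cons, List.take_succ_cons]
        rw [← ih]
        rfl
      | some i =>
        rw [hf] at ih
        simp only [Option.map_some, Option.getD_some, List.take_succ_cons]
        rw [← ih]
        rfl

-- phase 2 of A's loop (found_first = true): the last marker-free line, stripped, else the accumulator
theorem pv_loopA_true (ls : List String) (f : Option String) :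
    pvLoopA ls f true =
      ((ls.takeWhile (fun l => !PySem.Str.isIn pvPat l)).getLast?.map PySem.Str.strip).or f := by
  induction ls generalizing f with
  | nil => rfl
  | cons l ls ih =>
    by_cases h : PySem.Str.isIn pvPat l = true
    · simp only [pvLoopA, h, if_pos, List.takeWhile_cons, Bool.not_true, Bool.false_eq_true,
        ite_false, List.getLast?_nil, Option.map_none]
      rfl
    · have hb : PySem.Str.isIn pvPat l = false := by
        cases hx : PySem.Str.isIn pvPat l with
        | true => exact absurd hx h
        | false => rfl
      simp only [pvLoopA, hb, Bool.false_eq_true, ite_false, ih, List.takeWhile_cons,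
        Bool.not_false, if_pos, ite_true]
      cases ht : (ls.takeWhile (fun l => !PySem.Str.isIn pvPat l)).getLast? with
      | none =>
        rw [pv_getLast?_cons_none _ _ ht]
        rfl
      | some x =>
        rw [pv_getLast?_cons_some _ _ _ ht]
        rfl

-- phase 1 of A's loop (found_first = false): it scans to the first marker line
theorem pv_loopA_false (ls : List String) :
    pvLoopA ls none false =
      match ls.findIdx? (fun l => PySem.Str.isIn pvPat l) with
      | none => none
      | some i => pvLoopA (ls.drop (i + 1)) none true := by
  induction ls with
  | nil => rfl
  | cons l ls ih =>
    by_cases h : PySem.Str.isIn pvPat l = true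
    · simp only [pvLoopA, h, if_pos, ite_true, List.findIdx?_cons, List.drop_succ_cons,
        List.drop_zero]
      rfl
    · have hb : PySem.Str.isIn pvPat l = false := by
        cases hx : PySem.Str.isIn pvPat l with
        | true => exact absurd hx h
        | false => rfl
      simp only [pvLoopA, hb, Bool.false_eq_true, ite_false, List.findIdx?_cons, ih]
      cases hf : ls.findIdx? (fun l => PySem.Str.isIn pvPat l) with
      | none => rfl
      | some i => simp only [Option.map_some, List.drop_succ_cons]

-- ===== VERDICT (by name: the statement is the Claim_ definition above) =====
theorem extract_additional_features_spec : Claim_equal_extract_additional_features := by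
  intro lines _
  unfold Spec_extract_additional_features extract_additional_features extract_additional_features_alt
  rw [pv_loopA_false]
  cases hf : lines.findIdx? (fun l => PySem.Str.isIn pvPat l) with
  | none => rfl
  | some i =>
    simp only
    rw [pv_loopA_true, pv_take_findIdx, Option.or_none]
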